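-- pv_equiv track=rewrite | github.com/Chau57/CSAI-Project2-G3 | count_stats.py | analyze_puzzle
-- ===== SOURCE A (Python) =====
-- def analyze_puzzle(grid):
--     """
--     Phân tích grid để đếm:
--     1. Kích thước (Rows x Cols)
--     2. Số lượng đảo (Islands)
--     3. Số cạnh tiềm năng (Edges): Số cặp đảo có thể nối với nhau (thẳng hàng, không bị chặn)
--     """
--     if not grid: return 0, 0, 0, 0
--
--     rows = len(grid)
--     cols = len(grid[0])
--     islands = 0
--     potential_edges = 0
--
--     for r in range(rows):
--         for c in range(cols):
--             # Nếu gặp một đảo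
--             if grid[r][c] != 0:
--                 islands += 1
--
--                 # --- THUẬT TOÁN ĐẾM CẠNH ---
--                 # Chỉ cần nhìn sang Phải và xuống Dưới để không đếm trùng
--
--                 # 1. Nhìn sang Phải (Horizontal)
--                 for k in range(c + 1, cols):
--                     val = grid[r][k]
--                     if val != 0: # Gặp đảo hàng xóm
--                         potential_edges += 1
--                         break # Dừng, vì không thể nối xuyên qua đảo này
--
--                 # 2. Nhìn xuống Dưới (Vertical)
--                 for k in range(r + 1, rows):
--                     val = grid[k][c]
--                     if val != 0: # Gặp đảo hàng xóm
--                         potential_edges += 1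
--                         break # Dừng
--
--     return rows, cols, islands, potential_edges
-- ===== SOURCE B (Python) =====
-- def analyze_puzzle(grid):
--     if not grid:
--         return 0, 0, 0, 0
--     rows, cols = len(grid), len(grid[0])
--     row_counts = [sum(1 for v in row[:cols] if v != 0) for row in grid]
--     col_counts = [sum(1 for row in grid if row[c] != 0) for c in range(cols)]
--     islands = sum(row_counts)
--     edges = sum(n - 1 for n in row_counts if n > 0) + sum(n - 1 for n in col_counts if n > 0)
--     return rows, cols, islands, edges
-- ===== Notes on version B (the rewrite author's own statement) =====
-- stated objective: faster
-- what changed: Replaced the per-island linear scans to the right and downward with one row pass and one column pass: islands = total nonzero count, edges = sum over rows and columns of (nonzero count - 1 when positive).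
import Mathlib
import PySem

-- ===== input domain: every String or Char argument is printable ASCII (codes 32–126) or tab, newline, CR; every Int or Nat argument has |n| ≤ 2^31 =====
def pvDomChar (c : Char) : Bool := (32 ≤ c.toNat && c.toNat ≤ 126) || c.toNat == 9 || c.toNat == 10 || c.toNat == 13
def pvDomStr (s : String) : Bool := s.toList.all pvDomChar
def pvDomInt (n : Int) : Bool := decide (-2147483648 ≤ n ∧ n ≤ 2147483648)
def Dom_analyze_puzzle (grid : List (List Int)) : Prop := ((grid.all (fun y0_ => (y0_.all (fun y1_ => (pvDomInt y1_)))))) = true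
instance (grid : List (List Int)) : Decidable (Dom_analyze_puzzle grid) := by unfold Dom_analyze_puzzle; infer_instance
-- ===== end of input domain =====

-- B replaces A's per-island rightward/downward scans by one nonzero count per row and per
-- column: islands = total count, edges = Σ (count - 1 when positive) over rows and columns.

-- ===== PORT A =====
def analyze_puzzle (grid : List (List Int)) : List Int :=
  if grid = [] then [0, 0, 0, 0] else
  let rows : Int := grid.length
  let cols : Int := ((PySem.List.pyGetD grid 0 []).length : Int)
  let p : Int × Int :=
    (PySem.List.pyRange 0 rows 1).foldl (fun st r =>
      (PySem.List.pyRange 0 cols 1).foldl (fun st c =>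
        if PySem.List.pyGetD (PySem.List.pyGetD grid r []) c 0 ≠ 0 then
          let islands := st.1 + 1
          -- for k in range(c+1, cols): … break  (first nonzero to the right)
          let pe1 := if (PySem.List.pyRange (c + 1) cols 1).any
              (fun k => PySem.List.pyGetD (PySem.List.pyGetD grid r []) k 0 != 0)
            then st.2 + 1 else st.2
          -- for k in range(r+1, rows): … break  (first nonzero below)
          let pe2 := if (PySem.List.pyRange (r + 1) rows 1).any
              (fun k => PySem.List.pyGetD (PySem.List.pyGetD grid k []) c 0 != 0)
            then pe1 + 1 else pe1
          (islands, pe2)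
        else st) st) (0, 0)
  [rows, cols, p.1, p.2]

-- ===== PORT B =====
def analyze_puzzle_alt (grid : List (List Int)) : List Int :=
  if grid = [] then [0, 0, 0, 0] else
  let rows : Int := grid.length
  let cols : Int := ((PySem.List.pyGetD grid 0 []).length : Int)
  let rowCounts : List Int :=
    grid.map (fun row => ((PySem.List.slice row none (some cols)).countP (fun v => v != 0) : Int))
  let colCounts : List Int :=
    (PySem.List.pyRange 0 cols 1).map
      (fun c => ((grid.countP (fun row => PySem.List.pyGetD row c 0 != 0)) : Int))
  let islands : Int := rowCounts.sum
  let edges : Int :=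
    ((rowCounts.filter (fun n => decide (0 < n))).map (fun n => n - 1)).sum
    + ((colCounts.filter (fun n => decide (0 < n))).map (fun n => n - 1)).sum
  [rows, cols, islands, edges]

-- ===== PRECONDITION & SPEC =====
-- Pre_ excludes grids having a row shorter than the first row: A's full scan reads
-- grid[r][c] for every c < len(grid[0]) and raises IndexError on such a row (B raises too).
def Pre_analyze_puzzle (grid : List (List Int)) : Prop :=
  ∀ row ∈ grid, (PySem.List.pyGetD grid 0 []).length ≤ row.length
instance (grid : List (List Int)) : Decidable (Pre_analyze_puzzle grid) := by
  unfold Pre_analyze_puzzle; infer_instance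
def pvWitness_analyze_puzzle : List (List Int) := [[1, 0], [0, 1]]

def Spec_analyze_puzzle (grid : List (List Int)) (out : List Int) : Prop := out = analyze_puzzle_alt grid
instance (grid : List (List Int)) (out : List Int) : Decidable (Spec_analyze_puzzle grid out) := by unfold Spec_analyze_puzzle; infer_instance

-- ===== CLAIM (what is proved, stated in full; the proofs are below) =====
def Claim_equal_analyze_puzzle : Prop := ∀ (grid : List (List Int)), Dom_analyze_puzzle grid → Pre_analyze_puzzle grid → Spec_analyze_puzzle grid (analyze_puzzle grid)

-- ===== LEMMAS AND PROOFS =====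

-- Sum of `f head tail` over the successive tails of a list (the shape of A's per-cell work).
def tailsSum (f : Int → List Int → Int) : List Int → Int
  | [] => 0
  | x :: t => f x t + tailsSum f t

-- A's per-cell edge contribution in one line (1 if the cell is an island with another island after it).
def hfun (x : Int) (t : List Int) : Int :=
  if x ≠ 0 then (if t.any (fun v => v != 0) then 1 else 0) else 0

-- A fold whose step adds componentwise is a pair of sums.
lemma foldl_pair_split (l : List Int) (f g : Int → Int) (init : Int × Int) :
    l.foldl (fun st x => (st.1 + f x, st.2 + g x)) init
      = (init.1 + (l.map f).sum, init.2 + (l.map g).sum) := by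
  induction l generalizing init with
  | nil => simp
  | cons a t ih => simp [ih]; constructor <;> ring

-- Index-sum over List.range = structural sum over tails.
lemma sum_range_tails (f : Int → List Int → Int) (xs : List Int) :
    ((List.range xs.length).map (fun k => f (xs.getD k 0) (xs.drop (k + 1)))).sum
      = tailsSum f xs := by
  induction xs with
  | nil => simp [tailsSum]
  | cons x t ih =>
      simp only [List.range_succ_eq_map, List.map_map, List.length_cons, List.map_cons,
        List.sum_cons, tailsSum, ← ih]
      congr 1

-- The master reduction: A's indexed scan over a line (row or column), with an arbitrary
-- accessor that agrees with the list on its indices, is tailsSum hfun of that list.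
lemma sum_idx_eq_tailsSum (ys : List Int) (get : Int → Int)
    (hget : ∀ k : Nat, k < ys.length → get (k : Int) = ys.getD k 0) :
    ((PySem.List.pyRange 0 (ys.length : Int) 1).map (fun c =>
        if get c ≠ 0 then
          (if (PySem.List.pyRange (c + 1) (ys.length : Int) 1).any (fun k => get k != 0)
           then (1 : Int) else 0)
        else 0)).sum
      = tailsSum hfun ys := by
  rw [← sum_range_tails hfun ys, PySem.List.pyRange_zero_nat, List.map_map]
  refine congrArg List.sum (List.map_congr_left ?_)
  intro k hk
  have hk' : k < ys.length := List.mem_range.mp hk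
  have h1 : get (k : Int) = ys.getD k 0 := hget k hk'
  have h2 : (PySem.List.pyRange ((k : Int) + 1) (ys.length : Int) 1).any (fun j => get j != 0)
      = (ys.drop (k + 1)).any (fun v => v != 0) := by
    rw [PySem.List.any_congr_mem (g := fun j => PySem.List.pyGetD ys j 0 != 0) ?_]
    · rw [show (fun j => PySem.List.pyGetD ys j 0 != 0)
            = ((fun v => v != 0) ∘ (fun j => PySem.List.pyGetD ys j 0)) from rfl,
          ← List.any_map, PySem.List.map_pyGetD_pyRange' ys 0 (by positivity)]
      norm_num
    · intro j hj
      dsimp only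
      obtain ⟨hj1, hj2⟩ := PySem.List.mem_pyRange_one.mp hj
      have hj0 : j = ((j.toNat : Nat) : Int) := by omega
      rw [hj0, hget j.toNat (by omega), PySem.List.pyGetD_natCast]
  simp only [Function.comp, h1, h2, hfun]

-- Same on the island count: the indexed 0/1 sum is the nonzero count.
lemma sum_idx_eq_count (ys : List Int) (get : Int → Int)
    (hget : ∀ k : Nat, k < ys.length → get (k : Int) = ys.getD k 0) :
    ((PySem.List.pyRange 0 (ys.length : Int) 1).map (fun c =>
        if get c ≠ 0 then (1 : Int) else 0)).sum
      = (ys.countP (fun v => v != 0) : Int) := by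
  have hcg : ∀ c ∈ PySem.List.pyRange 0 (ys.length : Int) 1,
      (if get c ≠ 0 then (1 : Int) else 0)
        = (if PySem.List.pyGetD ys c 0 ≠ 0 then (1 : Int) else 0) := by
    intro c hc
    obtain ⟨hc1, hc2⟩ := PySem.List.mem_pyRange_one.mp hc
    have hc0 : c = ((c.toNat : Nat) : Int) := by omega
    rw [hc0, hget c.toNat (by omega), PySem.List.pyGetD_natCast]
  rw [List.map_congr_left hcg,
      show (fun c => if PySem.List.pyGetD ys c 0 ≠ 0 then (1 : Int) else 0)
        = ((fun v => if v ≠ 0 then (1 : Int) else 0) ∘ (fun c => PySem.List.pyGetD ys c 0)) from rfl,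
      ← List.map_map, PySem.List.map_pyGetD_pyRange_zero']
  rw [show (fun v : Int => if v ≠ 0 then (1 : Int) else 0)
        = (fun v : Int => if (v != 0) = true then (1 : Int) else 0) from by
      funext v; simp]
  exact PySem.List.sum_map_ite_one_zero (fun v => v != 0) ys

-- tailsSum hfun is (count - 1 when positive).
lemma tailsSum_hfun_eq (xs : List Int) :
    tailsSum hfun xs
      = (if 0 < xs.countP (fun v => v != 0) then (xs.countP (fun v => v != 0) : Int) - 1 else 0) := by
  induction xs with
  | nil => simp [tailsSum]
  | cons x t ih =>
      have hany : (t.any (fun v => v != 0) = true) ↔ 0 < t.countP (fun v => v != 0) := by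
        rw [List.any_eq_true, List.countP_pos_iff]
      by_cases hx : x ≠ 0
      · by_cases ht : t.any (fun v => v != 0) = true
        · have := hany.mp ht
          simp [tailsSum, hfun, hx, ht, ih, this]
        · have := ht
          have h0 : t.countP (fun v => v != 0) = 0 := by
            by_contra hne
            exact ht (hany.mpr (by omega))
          simp [tailsSum, hfun, hx, ht, ih, h0]
      · have hx0 : x = 0 := by omega
        simp [tailsSum, hfun, hx0, ih]

-- B's "sum(n-1 for n in l if n>0)" as a per-element sum.
lemma filter_map_sub_one_sum (l : List Int) :
    ((l.filter (fun n => decide (0 < n))).map (fun n => n - 1)).sum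
      = (l.map (fun n => if 0 < n then n - 1 else 0)).sum := by
  induction l with
  | nil => simp
  | cons a t ih => by_cases h : 0 < a <;> simp [h, ih]


-- Sum over row indices of a function of the indexed row = sum over the rows.
lemma sum_pyRange_rows (grid : List (List Int)) (g : List Int → Int) :
    ((PySem.List.pyRange 0 (grid.length : Int) 1).map
        (fun r => g (PySem.List.pyGetD grid r []))).sum = (grid.map g).sum := by
  rw [show (fun r => g (PySem.List.pyGetD grid r []))
        = (g ∘ (fun r => PySem.List.pyGetD grid r [])) from rfl,
      ← List.map_map, PySem.List.map_pyGetD_pyRange_zero']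

lemma take_getD (row : List Int) (n k : Nat) (hk : k < n) :
    (row.take n).getD k 0 = row.getD k 0 := by
  simp [List.getD_eq_getElem?_getD, hk]

-- A's per-row island count is the nonzero count of the first-n prefix.
lemma row_count_eq (row : List Int) (n : Nat) (hn : n ≤ row.length) :
    ((PySem.List.pyRange 0 (n : Int) 1).map
        (fun c => if PySem.List.pyGetD row c 0 ≠ 0 then (1 : Int) else 0)).sum
      = ((row.take n).countP (fun v => v != 0) : Int) := by
  have hlen : (row.take n).length = n := by simp [hn]
  rw [show ((n : Int)) = ((row.take n).length : Int) from by rw [hlen]]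
  refine sum_idx_eq_count (row.take n) (fun c => PySem.List.pyGetD row c 0) ?_
  intro k hk
  dsimp only
  rw [PySem.List.pyGetD_natCast, take_getD row n k (by omega)]

-- A's per-row horizontal-edge sum is tailsSum hfun of the first-n prefix.
lemma row_hedge_eq (row : List Int) (n : Nat) (hn : n ≤ row.length) :
    ((PySem.List.pyRange 0 (n : Int) 1).map (fun c =>
        if PySem.List.pyGetD row c 0 ≠ 0 then
          (if (PySem.List.pyRange (c + 1) (n : Int) 1).any
              (fun k => PySem.List.pyGetD row k 0 != 0) then (1 : Int) else 0)
        else 0)).sum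
      = tailsSum hfun (row.take n) := by
  have hlen : (row.take n).length = n := by simp [hn]
  rw [show ((n : Int)) = ((row.take n).length : Int) from by rw [hlen]]
  refine sum_idx_eq_tailsSum (row.take n) (fun c => PySem.List.pyGetD row c 0) ?_
  intro k hk
  dsimp only
  rw [PySem.List.pyGetD_natCast, take_getD row n k (by omega)]

-- A's per-column vertical-edge sum is tailsSum hfun of the extracted column.
lemma col_hedge_eq (grid : List (List Int)) (c : Int) :
    ((PySem.List.pyRange 0 (grid.length : Int) 1).map (fun r =>
        if PySem.List.pyGetD (PySem.List.pyGetD grid r []) c 0 ≠ 0 then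
          (if (PySem.List.pyRange (r + 1) (grid.length : Int) 1).any
              (fun k => PySem.List.pyGetD (PySem.List.pyGetD grid k []) c 0 != 0)
           then (1 : Int) else 0)
        else 0)).sum
      = tailsSum hfun (grid.map (fun row => PySem.List.pyGetD row c 0)) := by
  have hlen : (grid.map (fun row => PySem.List.pyGetD row c 0)).length = grid.length := by simp
  rw [show ((grid.length : Int)) = ((grid.map (fun row => PySem.List.pyGetD row c 0)).length : Int)
        from by rw [hlen]]
  refine sum_idx_eq_tailsSum _ (fun r => PySem.List.pyGetD (PySem.List.pyGetD grid r []) c 0) ?_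
  intro k hk
  have hk' : k < grid.length := by simpa using hk
  dsimp only
  rw [PySem.List.pyGetD_natCast, List.getD_eq_getElem _ _ hk',
      List.getD_eq_getElem _ _ (by simpa using hk'), List.getElem_map]

-- Swapping a double list sum.
lemma sum_map_comm (l1 l2 : List Int) (f : Int → Int → Int) :
    (l1.map (fun a => (l2.map (f a)).sum)).sum
      = (l2.map (fun b => (l1.map (fun a => f a b)).sum)).sum := by
  induction l1 with
  | nil => simp [List.map_const']
  | cons a t ih => simp [ih]

-- ===== VERDICT (by name: the statement is the Claim_ definition above) =====
theorem analyze_puzzle_spec : Claim_equal_analyze_puzzle := by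
  intro grid _ hpre
  unfold Spec_analyze_puzzle
  by_cases hg : grid = []
  · simp [analyze_puzzle, analyze_puzzle_alt, hg]
  · have hpre' : ∀ row ∈ grid, (PySem.List.pyGetD grid 0 []).length ≤ row.length := hpre
    simp only [analyze_puzzle, analyze_puzzle_alt, if_neg hg]
    set N := (PySem.List.pyGetD grid 0 []).length with hN
    -- names for the per-row pieces of A's per-cell contributions
    set P : Int → Int := fun r => ((PySem.List.pyRange 0 (N : Int) 1).map
        (fun c => if PySem.List.pyGetD (PySem.List.pyGetD grid r []) c 0 ≠ 0 then (1 : Int) else 0)).sum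
      with hP
    set EH : Int → Int := fun r => ((PySem.List.pyRange 0 (N : Int) 1).map (fun c =>
        if PySem.List.pyGetD (PySem.List.pyGetD grid r []) c 0 ≠ 0 then
          (if (PySem.List.pyRange (c + 1) (N : Int) 1).any
              (fun k => PySem.List.pyGetD (PySem.List.pyGetD grid r []) k 0 != 0)
           then (1 : Int) else 0)
        else 0)).sum
      with hEH
    set EV : Int → Int := fun r => ((PySem.List.pyRange 0 (N : Int) 1).map (fun c =>
        if PySem.List.pyGetD (PySem.List.pyGetD grid r []) c 0 ≠ 0 then
          (if (PySem.List.pyRange (r + 1) (grid.length : Int) 1).any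
              (fun k => PySem.List.pyGetD (PySem.List.pyGetD grid k []) c 0 != 0)
           then (1 : Int) else 0)
        else 0)).sum
      with hEV
    -- Step 1: A's inner loop body adds componentwise.
    have hstep : ∀ r : Int,
        (fun (st : Int × Int) (c : Int) =>
          if PySem.List.pyGetD (PySem.List.pyGetD grid r []) c 0 ≠ 0 then
            (st.1 + 1,
              if ((PySem.List.pyRange (r + 1) (grid.length : Int) 1).any fun k =>
                    PySem.List.pyGetD (PySem.List.pyGetD grid k []) c 0 != 0) = true then
                (if ((PySem.List.pyRange (c + 1) (N : Int) 1).any fun k =>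
                      PySem.List.pyGetD (PySem.List.pyGetD grid r []) k 0 != 0) = true
                 then st.2 + 1 else st.2) + 1
              else
                if ((PySem.List.pyRange (c + 1) (N : Int) 1).any fun k =>
                      PySem.List.pyGetD (PySem.List.pyGetD grid r []) k 0 != 0) = true
                then st.2 + 1 else st.2)
          else st)
        = fun st c =>
            (st.1 + (if PySem.List.pyGetD (PySem.List.pyGetD grid r []) c 0 ≠ 0 then (1 : Int) else 0),
             st.2 + ((if PySem.List.pyGetD (PySem.List.pyGetD grid r []) c 0 ≠ 0 then
                        (if (PySem.List.pyRange (c + 1) (N : Int) 1).any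
                            (fun k => PySem.List.pyGetD (PySem.List.pyGetD grid r []) k 0 != 0)
                         then (1 : Int) else 0) else 0)
                   + (if PySem.List.pyGetD (PySem.List.pyGetD grid r []) c 0 ≠ 0 then
                        (if (PySem.List.pyRange (r + 1) (grid.length : Int) 1).any
                            (fun k => PySem.List.pyGetD (PySem.List.pyGetD grid k []) c 0 != 0)
                         then (1 : Int) else 0) else 0))) := by
      intro r; funext st c
      split_ifs <;> simp [Prod.ext_iff] <;> omega
    -- Step 2: A's outer loop body adds componentwise too.
    have houter :
        (fun (st : Int × Int) (r : Int) =>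
          List.foldl
            (fun st c =>
              if PySem.List.pyGetD (PySem.List.pyGetD grid r []) c 0 ≠ 0 then
                (st.1 + 1,
                  if ((PySem.List.pyRange (r + 1) (grid.length : Int) 1).any fun k =>
                        PySem.List.pyGetD (PySem.List.pyGetD grid k []) c 0 != 0) = true then
                    (if ((PySem.List.pyRange (c + 1) (N : Int) 1).any fun k =>
                          PySem.List.pyGetD (PySem.List.pyGetD grid r []) k 0 != 0) = true
                     then st.2 + 1 else st.2) + 1
                  else
                    if ((PySem.List.pyRange (c + 1) (N : Int) 1).any fun k =>
                          PySem.List.pyGetD (PySem.List.pyGetD grid r []) k 0 != 0) = true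
                    then st.2 + 1 else st.2)
              else st)
            st (PySem.List.pyRange 0 (N : Int) 1))
        = fun st r => (st.1 + P r, st.2 + (EH r + EV r)) := by
      funext st r
      rw [hstep r, foldl_pair_split]
      rw [hP, hEH, hEV]
      simp only [PySem.List.sum_map_add_int]
    rw [houter, foldl_pair_split]
    simp only [List.cons.injEq, and_true, true_and, zero_add]
    constructor
    · -- islands
      rw [hP]
      rw [sum_pyRange_rows grid (fun row => ((PySem.List.pyRange 0 (N : Int) 1).map
            (fun c => if PySem.List.pyGetD row c 0 ≠ 0 then (1 : Int) else 0)).sum)]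
      refine congrArg List.sum (List.map_congr_left ?_)
      intro row hrow
      rw [PySem.List.slice_to_natCast, row_count_eq row N (hpre' row hrow)]
    · -- edges
      rw [PySem.List.sum_map_add_int]
      congr 1
      · -- horizontal part vs B's row pass
        rw [hEH]
        rw [sum_pyRange_rows grid (fun row => ((PySem.List.pyRange 0 (N : Int) 1).map (fun c =>
              if PySem.List.pyGetD row c 0 ≠ 0 then
                (if (PySem.List.pyRange (c + 1) (N : Int) 1).any
                    (fun k => PySem.List.pyGetD row k 0 != 0) then (1 : Int) else 0)
              else 0)).sum)]
        rw [filter_map_sub_one_sum, List.map_map]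
        refine congrArg List.sum (List.map_congr_left ?_)
        intro row hrow
        rw [row_hedge_eq row N (hpre' row hrow), tailsSum_hfun_eq]
        simp only [Function.comp, PySem.List.slice_to_natCast]
        split_ifs with h1 h2 h2 <;> push_cast <;> omega
      · -- vertical part vs B's column pass
        rw [hEV, sum_map_comm]
        rw [filter_map_sub_one_sum, List.map_map]
        refine congrArg List.sum (List.map_congr_left ?_)
        intro c hc
        rw [col_hedge_eq grid c, tailsSum_hfun_eq]
        have hcnt : (grid.map (fun row => PySem.List.pyGetD row c 0)).countP (fun v => v != 0)
            = grid.countP (fun row => PySem.List.pyGetD row c 0 != 0) := by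
          rw [List.countP_map]; rfl
        rw [hcnt]
        simp only [Function.comp]
        split_ifs with h1 h2 h2 <;> push_cast <;> omega
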